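-- pv_equiv track=rewrite | github.com/GDGAlgiers/GCPC-Challenges | Secret Agent/sol.py | SecretAgent
-- ===== SOURCE A (Python) =====
-- def SecretAgent(pin):
--     digit_equivalent = {
--         "0": ["0", "8"],
--         "1": ["1", "2", "4"],
--         "2": ["1", "2", "3", "5"],
--         "3": ["2", "3", "6"],
--         "4": ["1", "4", "5", "7"],
--         "5": ["2", "4", "5", "6", "8"],
--         "6": ["3", "5", "6", "9"],
--         "7": ["4", "7", "8"],
--         "8": ["0", "5", "7", "8", "9"],
--         "9": ["6", "8", "9"]
--     }
--
--     comb = []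
--     for digit in reversed(pin):
--         arr = digit_equivalent[digit]
--         comb = get_combinations(arr, comb)
--     return comb
--
-- def get_combinations(arr1, arr2):
--     combination = []
--     if len(arr1) == 0:
--         return arr2
--     if len(arr2) == 0:
--         return arr1
--
--     for i in arr1:
--         for j in arr2:
--             combination.append(i + j)
--
--     return combination
-- ===== SOURCE B (Python) =====
-- def SecretAgent(pin):
--     digit_equivalent = {
--         "0": ["0", "8"],
--         "1": ["1", "2", "4"],
--         "2": ["1", "2", "3", "5"],
--         "3": ["2", "3", "6"],
--         "4": ["1", "4", "5", "7"],
--         "5": ["2", "4", "5", "6", "8"],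
--         "6": ["3", "5", "6", "9"],
--         "7": ["4", "7", "8"],
--         "8": ["0", "5", "7", "8", "9"],
--         "9": ["6", "8", "9"]
--     }
--     if not pin:
--         return []
--     if len(pin) == 1:
--         return list(digit_equivalent[pin])
--     rest = SecretAgent(pin[1:])
--     return [e + r for e in digit_equivalent[pin[0]] for r in rest]
-- ===== Notes on version B (the rewrite author's own statement) =====
-- stated objective: simpler
-- what changed: Replaced A's reversed-iteration fold through a separate get_combinations cross-product helper with direct structural recursion over the pin (head digit combined with the recursion on the suffix), keeping the same dict and output order.
import Mathlib
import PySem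

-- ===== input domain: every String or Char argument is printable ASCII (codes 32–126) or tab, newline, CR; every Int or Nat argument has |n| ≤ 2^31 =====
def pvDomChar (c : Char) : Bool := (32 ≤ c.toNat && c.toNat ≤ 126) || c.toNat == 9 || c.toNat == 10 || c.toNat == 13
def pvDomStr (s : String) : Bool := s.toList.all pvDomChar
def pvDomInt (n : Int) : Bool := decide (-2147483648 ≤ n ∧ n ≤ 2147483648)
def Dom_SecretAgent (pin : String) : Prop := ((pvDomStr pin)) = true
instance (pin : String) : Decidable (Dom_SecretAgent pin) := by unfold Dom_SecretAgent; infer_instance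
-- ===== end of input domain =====

-- B replaces A's reversed fold with a cross-product helper by direct structural
-- recursion over the pin (same dict, same output order); objective: simpler.
-- On pins with a non-digit character both Pythons raise KeyError — Pre_ excludes those.

-- ===== PORT A =====
def pvDigitEqA : PySem.Dict String (List String) :=
  PySem.Dict.ofList [("0", ["0", "8"]), ("1", ["1", "2", "4"]), ("2", ["1", "2", "3", "5"]),
   ("3", ["2", "3", "6"]), ("4", ["1", "4", "5", "7"]), ("5", ["2", "4", "5", "6", "8"]),
   ("6", ["3", "5", "6", "9"]), ("7", ["4", "7", "8"]), ("8", ["0", "5", "7", "8", "9"]),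
   ("9", ["6", "8", "9"])]

-- get_combinations: the nested append loop, step for step
def pvGetCombinations (arr1 arr2 : List String) : List String :=
  if arr1 = [] then arr2
  else if arr2 = [] then arr1
  else arr1.foldl (fun acc i => arr2.foldl (fun acc2 j => acc2 ++ [i ++ j]) acc) []

-- dict lookup digit_equivalent[digit]: getD with [] stands for the lookup;
-- the KeyError inputs (non-digit chars) are exactly those excluded by Pre_
def SecretAgent (pin : String) : List String :=
  pin.toList.reverse.foldl
    (fun comb digit => pvGetCombinations (pvDigitEqA.getD (String.ofList [digit]) []) comb) []

-- ===== PORT B =====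
-- B's dict lookup, as a per-character table ([] stands for Python's KeyError, outside Pre_)
def pvDigitEqB (c : Char) : List String :=
  match c with
  | '0' => ["0", "8"]
  | '1' => ["1", "2", "4"]
  | '2' => ["1", "2", "3", "5"]
  | '3' => ["2", "3", "6"]
  | '4' => ["1", "4", "5", "7"]
  | '5' => ["2", "4", "5", "6", "8"]
  | '6' => ["3", "5", "6", "9"]
  | '7' => ["4", "7", "8"]
  | '8' => ["0", "5", "7", "8", "9"]
  | '9' => ["6", "8", "9"]
  | _ => []

def pvSecretAgentRecB : List Char → List String
  | [] => []
  | [c] => pvDigitEqB c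
  | c :: rest =>
      (pvDigitEqB c).flatMap (fun e => (pvSecretAgentRecB rest).map (fun r => e ++ r))

def SecretAgent_alt (pin : String) : List String := pvSecretAgentRecB pin.toList

-- ===== PRECONDITION & SPEC =====
-- Pre_ excludes exactly the pins containing a non-digit character, on which A raises KeyError.
def Pre_SecretAgent (pin : String) : Prop :=
  pin.toList.all (fun c => ['0', '1', '2', '3', '4', '5', '6', '7', '8', '9'].contains c) = true
instance (pin : String) : Decidable (Pre_SecretAgent pin) := by unfold Pre_SecretAgent; infer_instance
def pvWitness_SecretAgent : String := "13"

def Spec_SecretAgent (pin : String) (out : List String) : Prop := out = SecretAgent_alt pin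
instance (pin : String) (out : List String) : Decidable (Spec_SecretAgent pin out) := by unfold Spec_SecretAgent; infer_instance

-- ===== CLAIM (what is proved, stated in full; the proofs are below) =====
def Claim_equal_SecretAgent : Prop := ∀ (pin : String), Dom_SecretAgent pin → Pre_SecretAgent pin → Spec_SecretAgent pin (SecretAgent pin)

-- ===== LEMMAS AND PROOFS =====

-- A's lookup agrees with B's table on every digit, and is nonempty there
theorem pvEq_lookup_eq (c : Char)
    (hc : c ∈ ['0', '1', '2', '3', '4', '5', '6', '7', '8', '9']) :
    pvDigitEqA.getD (String.ofList [c]) [] = pvDigitEqB c ∧ pvDigitEqB c ≠ [] := by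
  fin_cases hc <;> exact ⟨by decide, by decide⟩

-- the nested append loop of get_combinations is the flatMap of maps
theorem pvGetCombinations_eq (arr1 arr2 : List String) (h1 : arr1 ≠ []) (h2 : arr2 ≠ []) :
    pvGetCombinations arr1 arr2 = arr1.flatMap (fun i => arr2.map (fun j => i ++ j)) := by
  unfold pvGetCombinations
  rw [if_neg h1, if_neg h2]
  have : ∀ (l : List String) (acc : List String),
      l.foldl (fun acc i => arr2.foldl (fun acc2 j => acc2 ++ [i ++ j]) acc) acc
        = acc ++ l.flatMap (fun i => arr2.map (fun j => i ++ j)) := by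
    intro l
    induction l with
    | nil => simp
    | cons x xs ih =>
        intro acc
        rw [List.foldl_cons, PySem.List.foldl_append_singleton_eq_map, ih,
          List.flatMap_cons, List.append_assoc]
  simpa using this arr1 []

-- main invariant: A's foldr form equals B's recursion, and the result is nonempty
theorem pvMain (l : List Char)
    (h : ∀ c ∈ l, c ∈ ['0', '1', '2', '3', '4', '5', '6', '7', '8', '9']) :
    l.foldr (fun digit comb => pvGetCombinations (pvDigitEqA.getD (String.ofList [digit]) []) comb) []
      = pvSecretAgentRecB l ∧ (l ≠ [] → pvSecretAgentRecB l ≠ []) := by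
  induction l with
  | nil => exact ⟨rfl, by simp⟩
  | cons c rest ih =>
    have hc := pvEq_lookup_eq c (h c (List.mem_cons_self ..))
    have ih' := ih (fun x hx => h x (List.mem_cons_of_mem _ hx))
    cases rest with
    | nil =>
        refine ⟨?_, fun _ => hc.2⟩
        show pvGetCombinations (pvDigitEqA.getD (String.ofList [c]) []) [] = pvDigitEqB c
        rw [hc.1]
        unfold pvGetCombinations
        rw [if_neg hc.2, if_pos rfl]
    | cons d t =>
        have hne : pvSecretAgentRecB (d :: t) ≠ [] := ih'.2 (by simp)
        have heq : pvSecretAgentRecB (c :: d :: t)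
            = (pvDigitEqB c).flatMap (fun e => (pvSecretAgentRecB (d :: t)).map (fun r => e ++ r)) := rfl
        constructor
        · rw [List.foldr_cons, ih'.1, heq, hc.1]
          exact pvGetCombinations_eq _ _ hc.2 hne
        · intro _
          rw [heq]
          simp only [ne_eq, List.flatMap_eq_nil_iff, not_forall]
          rcases List.exists_mem_of_ne_nil _ hc.2 with ⟨e, he⟩
          exact ⟨e, he, by simpa using hne⟩

-- ===== VERDICT (by name: the statement is the Claim_ definition above) =====
theorem SecretAgent_spec : Claim_equal_SecretAgent := by
  intro pin _ hpre
  have hmem : ∀ c ∈ pin.toList, c ∈ ['0', '1', '2', '3', '4', '5', '6', '7', '8', '9'] := by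
    simpa [Pre_SecretAgent, List.all_eq_true] using hpre
  show SecretAgent pin = SecretAgent_alt pin
  unfold SecretAgent SecretAgent_alt
  rw [List.foldl_reverse]
  exact (pvMain pin.toList hmem).1
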